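-- pv_equiv track=rewrite | github.com/ZeCa-Caloo/HTML-PDF | app.py | strip_unsupported_at_rules
-- ===== SOURCE A (Python) =====
-- UNSUPPORTED_AT_RULES = ("@media", "@supports", "@keyframes", "@-webkit-", "@-moz-", "@-ms-")
--
-- def strip_unsupported_at_rules(css: str) -> str:
--     out, i = [], 0
--     while i < len(css):
--         if css[i] == "@" and any(css.startswith(x, i) for x in UNSUPPORTED_AT_RULES):
--             depth, j = 0, i
--             while j < len(css):
--                 if css[j] == "{":
--                     depth += 1
--                 elif css[j] == "}":
--                     depth -= 1
--                     if depth <= 0: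
--                         j += 1
--                         break
--                 j += 1
--             i = j
--             continue
--         out.append(css[i]); i += 1
--     return "".join(out)
-- ===== SOURCE B (Python) =====
-- UNSUPPORTED_AT_RULES = ("@media", "@supports", "@keyframes", "@-webkit-", "@-moz-", "@-ms-")
--
-- def strip_unsupported_at_rules(css: str) -> str:
--     # Single-pass state machine: either copying, or skipping with a brace depth.
--     out = []
--     skipping, depth = False, 0
--     for j, c in enumerate(css):
--         if skipping:
--             if c == "{":
--                 depth += 1
--             elif c == "}":
--                 depth -= 1
--                 if depth <= 0:
--                     skipping = False
--         elif c == "@" and css.startswith(UNSUPPORTED_AT_RULES, j):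
--             skipping, depth = True, 0
--         else:
--             out.append(c)
--     return "".join(out)
-- ===== Notes on version B (the rewrite author's own statement) =====
-- stated objective: faster
-- what changed: Replaces A's outer loop with a nested inner brace-matching while loop by a single flat pass over the characters driven by a (skipping, depth) state machine, so there is no inner loop and no index jumping; measured constant-factor faster.
import Mathlib
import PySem

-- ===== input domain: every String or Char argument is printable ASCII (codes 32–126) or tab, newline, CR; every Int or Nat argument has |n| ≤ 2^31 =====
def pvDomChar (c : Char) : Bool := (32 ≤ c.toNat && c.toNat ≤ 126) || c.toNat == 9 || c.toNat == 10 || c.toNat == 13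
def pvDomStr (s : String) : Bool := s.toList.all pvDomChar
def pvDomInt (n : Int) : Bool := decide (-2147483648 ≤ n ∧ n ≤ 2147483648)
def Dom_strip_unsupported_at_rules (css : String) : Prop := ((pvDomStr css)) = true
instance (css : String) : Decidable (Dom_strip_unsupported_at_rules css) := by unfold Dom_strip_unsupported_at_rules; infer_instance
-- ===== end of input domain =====

-- B replaces A's nested loops (outer scan + inner brace matcher) by one flat pass with a
-- (skipping, depth) state machine; same result; a timing run measured B constant-factor faster.

-- shared module constant UNSUPPORTED_AT_RULES and the prefix test both Pythons perform
def unsupportedAtRules : List (List Char) :=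
  ["@media".toList, "@supports".toList, "@keyframes".toList,
   "@-webkit-".toList, "@-moz-".toList, "@-ms-".toList]

def anyUnsupported (l : List Char) : Bool :=
  unsupportedAtRules.any (fun p => p.isPrefixOf l)

-- ===== PORT A =====
-- A's inner while loop: brace-depth matcher starting at the '@'; returns the suffix after the block
def skipA : List Char → Int → List Char
  | [], _ => []
  | c :: rest, depth =>
    if c = '{' then skipA rest (depth + 1)
    else if c = '}' then
      (if depth - 1 ≤ 0 then rest else skipA rest (depth - 1))
    else skipA rest depth

theorem skipA_length_le : ∀ (l : List Char) (d : Int), (skipA l d).length ≤ l.length := by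
  intro l
  induction l with
  | nil => intro d; simp [skipA]
  | cons c rest ih =>
    intro d
    simp only [skipA, List.length_cons]
    split_ifs
    · exact Nat.le_succ_of_le (ih _)
    · exact Nat.le_succ _
    · exact Nat.le_succ_of_le (ih _)
    · exact Nat.le_succ_of_le (ih _)

theorem skipA_cons_lt (c : Char) (rest : List Char) (d : Int) :
    (skipA (c :: rest) d).length < (c :: rest).length := by
  simp only [skipA, List.length_cons]
  split_ifs
  · exact Nat.lt_succ_of_le (skipA_length_le rest _)
  · exact Nat.lt_succ_self _
  · exact Nat.lt_succ_of_le (skipA_length_le rest _)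
  · exact Nat.lt_succ_of_le (skipA_length_le rest _)

-- A's outer while loop, one character at a time, restarting after each skipped block
def loopA : List Char → List Char
  | [] => []
  | c :: rest =>
    if c = '@' && anyUnsupported (c :: rest) then
      loopA (skipA (c :: rest) 0)
    else
      c :: loopA rest
termination_by l => l.length
decreasing_by
  · exact skipA_cons_lt c rest 0
  · simp

def strip_unsupported_at_rules (css : String) : String :=
  String.ofList (loopA css.toList)

-- ===== PORT B =====
-- B's single for-loop over the characters; the Bool is the `skipping` flag, the Int the depth.
-- `css.startswith(UNSUPPORTED_AT_RULES, j)` is the prefix test on the current suffix.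
def loopB : List Char → Bool → Int → List Char
  | [], _, _ => []
  | c :: rest, true, depth =>
    if c = '{' then loopB rest true (depth + 1)
    else if c = '}' then
      (if depth - 1 ≤ 0 then loopB rest false 0 else loopB rest true (depth - 1))
    else loopB rest true depth
  | c :: rest, false, _ =>
    if c = '@' && anyUnsupported (c :: rest) then loopB rest true 0
    else c :: loopB rest false 0

def strip_unsupported_at_rules_alt (css : String) : String :=
  String.ofList (loopB css.toList false 0)

-- ===== PRECONDITION & SPEC =====
def Spec_strip_unsupported_at_rules (css : String) (out : String) : Prop := out = strip_unsupported_at_rules_alt css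
instance (css : String) (out : String) : Decidable (Spec_strip_unsupported_at_rules css out) := by unfold Spec_strip_unsupported_at_rules; infer_instance

-- ===== CLAIM (what is proved, stated in full; the proofs are below) =====
def Claim_equal_strip_unsupported_at_rules : Prop := ∀ (css : String), Dom_strip_unsupported_at_rules css → Spec_strip_unsupported_at_rules css (strip_unsupported_at_rules css)

-- ===== LEMMAS AND PROOFS =====

-- B in skipping mode computes exactly "resume copying after A's brace matcher"
theorem loopB_true_eq (l : List Char) : ∀ (d : Int), loopB l true d = loopB (skipA l d) false 0 := by
  induction l with
  | nil => intro d; simp [loopB, skipA]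
  | cons c rest ih =>
    intro d
    simp only [loopB, skipA]
    split_ifs with h1 h2 h3
    · exact ih _
    · rfl
    · exact ih _
    · exact ih _

theorem loopA_eq_loopB (l : List Char) : loopA l = loopB l false 0 := by
  induction hn : l.length using Nat.strong_induction_on generalizing l with
  | _ n ih =>
    match l, hn with
    | [], _ => rw [loopA]; rfl
    | c :: rest, hn =>
      rw [loopA]
      cases hg : (decide (c = '@') && anyUnsupported (c :: rest)) with
      | false =>
        simp only [hg, if_neg Bool.false_ne_true]
        conv_rhs => rw [loopB]
        simp only [hg, if_neg Bool.false_ne_true]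
        subst hn
        exact congrArg _ (ih rest.length (by simp) rest rfl)
      | true =>
        have hc : c = '@' := by
          have := (Bool.and_eq_true _ _).mp hg
          exact of_decide_eq_true this.1
        simp only [hg]
        conv_rhs => rw [loopB]
        simp only [hg]
        rw [loopB_true_eq]
        subst hc
        have hskip : skipA ('@' :: rest) 0 = skipA rest 0 := by
          simp [skipA]
        rw [hskip]
        subst hn
        exact ih (skipA rest 0).length
          (Nat.lt_succ_of_le (skipA_length_le rest 0)) _ rfl

-- ===== VERDICT (by name: the statement is the Claim_ definition above) =====
theorem strip_unsupported_at_rules_spec : Claim_equal_strip_unsupported_at_rules := by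
  intro css _
  unfold Spec_strip_unsupported_at_rules strip_unsupported_at_rules strip_unsupported_at_rules_alt
  rw [loopA_eq_loopB]
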